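-- pv_equiv track=rewrite | github.com/davidarizaldi/Go-Agent-Simple | go.py | capture_stones
-- ===== SOURCE A (Python) =====
-- def capture_stones(board, x, y, current_player, prisoners):
--     """Capture opponent's stones and update the prisoners count."""
--     opponent = 'O' if current_player == 'X' else 'X'
--     captured = 0
--     size = len(board)
--
--     for dx, dy in [(-1, 0), (1, 0), (0, -1), (0, 1)]:
--         nx, ny = x + dx, y + dy
--         if 0 <= nx < size and 0 <= ny < size and board[nx][ny] == opponent:
--             if is_group_captured(board, nx, ny, opponent):
--                 captured += remove_group(board, nx, ny, opponent)
--
--     prisoners[current_player] += captured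
--     return captured
--
-- def is_group_captured(board, x, y, player):
--     """Check if a group of stones is captured (no liberties)."""
--     visited = set()
--     return not has_liberties(board, x, y, player, visited)
--
-- def has_liberties(board, x, y, player, visited):
--     """Check if a group has any liberties."""
--     if (x, y) in visited:
--         return False
--     visited.add((x, y))
--     size = len(board)
--     if board[x][y] == '.':
--         return True
--     if board[x][y] != player:
--         return False
--
--     for dx, dy in [(-1, 0), (1, 0), (0, -1), (0, 1)]:
--         nx, ny = x + dx, y + dy
--         if 0 <= nx < size and 0 <= ny < size:
--             if has_liberties(board, nx, ny, player, visited):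
--                 return True
--     return False
--
-- def remove_group(board, x, y, player):
--     """Remove a group of stones from the board."""
--     queue = [(x, y)]
--     captured = 0
--     while queue:
--         cx, cy = queue.pop()
--         if board[cx][cy] == player:
--             board[cx][cy] = '.'
--             captured += 1
--             for dx, dy in [(-1, 0), (1, 0), (0, -1), (0, 1)]:
--                 nx, ny = cx + dx, cy + dy
--                 if 0 <= nx < len(board) and 0 <= ny < len(board) and board[nx][ny] == player:
--                     queue.append((nx, ny))
--     return captured
-- ===== SOURCE B (Python) =====
-- def capture_stones(board, x, y, current_player, prisoners):
--     """Capture opponent's stones and update the prisoners count.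
--
--     Single iterative flood fill per opponent neighbor: collect the connected
--     group while recording whether any liberty ('.') touches it; clear the
--     group only afterwards if it has no liberty.
--     """
--     opponent = 'O' if current_player == 'X' else 'X'
--     size = len(board)
--     captured = 0
--
--     for nx, ny in ((x - 1, y), (x + 1, y), (x, y - 1), (x, y + 1)):
--         if 0 <= nx < size and 0 <= ny < size and board[nx][ny] == opponent:
--             group = []
--             liberty = False
--             stack = [(nx, ny)]
--             while stack:
--                 cx, cy = stack.pop()
--                 if (cx, cy) in group:
--                     continue
--                 group.append((cx, cy))
--                 for ax, ay in ((cx - 1, cy), (cx + 1, cy), (cx, cy - 1), (cx, cy + 1)):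
--                     if 0 <= ax < size and 0 <= ay < size:
--                         cell = board[ax][ay]
--                         if cell == '.':
--                             liberty = True
--                         elif cell == opponent:
--                             stack.append((ax, ay))
--             if not liberty:
--                 for cx, cy in group:
--                     board[cx][cy] = '.'
--                 captured += len(group)
--
--     prisoners[current_player] += captured
--     return captured
-- ===== Notes on version B (the rewrite author's own statement) =====
-- stated objective: alternative
-- what changed: A decides capture with a recursive DFS liberty check (has_liberties with a shared visited set) and then re-traverses the group with a destructive stack loop to remove it; B runs one iterative flood fill per opponent neighbor that collects the whole group and a liberty flag in a single traversal, clearing the collected cells afterwards only if no liberty was seen.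
-- outside the precondition, e.g. on capture_stones([['O', '.', '.'], ['.', '.', '.'], ['X']], 0, 1, 'X', {'X': 0}): A returns 0, B returns 0
import Mathlib
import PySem

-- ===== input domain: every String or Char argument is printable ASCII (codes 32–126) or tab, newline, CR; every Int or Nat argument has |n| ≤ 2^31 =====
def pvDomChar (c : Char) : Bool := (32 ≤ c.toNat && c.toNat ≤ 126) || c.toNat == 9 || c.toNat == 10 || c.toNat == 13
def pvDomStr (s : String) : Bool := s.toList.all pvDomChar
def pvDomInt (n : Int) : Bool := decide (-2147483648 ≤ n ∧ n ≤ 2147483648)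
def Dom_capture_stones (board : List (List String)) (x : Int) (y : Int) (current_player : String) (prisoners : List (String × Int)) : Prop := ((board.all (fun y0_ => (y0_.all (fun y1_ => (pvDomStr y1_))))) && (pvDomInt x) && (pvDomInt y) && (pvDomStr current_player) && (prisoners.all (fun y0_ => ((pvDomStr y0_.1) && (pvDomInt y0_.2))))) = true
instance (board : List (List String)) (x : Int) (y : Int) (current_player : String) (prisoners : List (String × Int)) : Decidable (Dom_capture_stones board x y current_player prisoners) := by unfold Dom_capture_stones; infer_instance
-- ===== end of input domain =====

-- B replaces A's recursive DFS liberty check + separate destructive removal pass by ONE iterative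
-- flood fill per opponent neighbor (collect group + liberty flag, clear afterwards); equal return
-- value. Both Pythons mutate `board` and `prisoners` identically; the theorems are about the
-- RETURN value only.

-- ===== PORT A =====
-- board[i][j] for 0 ≤ i,j (out-of-range reads give "", excluded by Pre_ for cells A touches)
def pvGet2 (b : List (List String)) (i j : Int) : String :=
  (PySem.List.pyGet? ((PySem.List.pyGet? b i).getD []) j).getD ""

-- board[i][j] = v (indices are nonnegative and in range at every call site admitted by Pre_)
def pvSet2 (b : List (List String)) (i j : Int) (v : String) : List (List String) :=
  b.set i.toNat ((b.getD i.toNat []).set j.toNat v)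

-- the literal delta list of A's loops
def pvDeltas : List (Int × Int) := [(-1, 0), (1, 0), (0, -1), (0, 1)]

mutual
-- has_liberties: the Nat argument is a fuel/totality guard only (provably sufficient at the
-- call site below); visited is a Python set, threaded through the loop as in A.
def hasLiberties (b : List (List String)) (p : String) : Nat → Int → Int → List (Int × Int) → Bool × List (Int × Int)
  | 0, _, _, vis => (false, vis)
  | fuel + 1, x, y, vis =>
    if (x, y) ∈ vis then (false, vis)
    else
      let vis' := PySem.Set.add vis (x, y)
      if pvGet2 b x y = "." then (true, vis')
      else if pvGet2 b x y ≠ p then (false, vis')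
      else hlLoop b p fuel x y pvDeltas vis'
  termination_by fuel => (fuel, 0)

-- the for-loop of has_liberties with its early `return True`
def hlLoop (b : List (List String)) (p : String) : Nat → Int → Int → List (Int × Int) → List (Int × Int) → Bool × List (Int × Int)
  | _, _, _, [], vis => (false, vis)
  | fuel, x, y, d :: ds, vis =>
    let nx := x + d.1
    let ny := y + d.2
    if 0 ≤ nx ∧ nx < (b.length : Int) ∧ 0 ≤ ny ∧ ny < (b.length : Int) then
      match hasLiberties b p fuel nx ny vis with
      | (true, vis2) => (true, vis2)
      | (false, vis2) => hlLoop b p fuel x y ds vis2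
    else hlLoop b p fuel x y ds vis
  termination_by fuel _ _ ds => (fuel, ds.length + 1)
end

-- is_group_captured (fuel b.length² + 1 is enough: each recursive call adds a fresh in-bounds
-- cell to visited)
def isGroupCaptured (b : List (List String)) (x y : Int) (p : String) : Bool :=
  !(hasLiberties b p (b.length * b.length + 1) x y []).1

-- the while-loop of remove_group; the stack keeps its top at the HEAD (Python appends and pops
-- at the tail); Nat argument is a fuel/totality guard, sufficient at the call site
def rgLoop (p : String) : Nat → List (List String) → List (Int × Int) → Int → Int × List (List String)
  | 0, bc, _, k => (k, bc)
  | _ + 1, bc, [], k => (k, bc)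
  | fuel + 1, bc, c :: st, k =>
    if pvGet2 bc c.1 c.2 = p then
      let bc' := pvSet2 bc c.1 c.2 "."
      let push := pvDeltas.foldl (fun acc d =>
        let nx := c.1 + d.1
        let ny := c.2 + d.2
        if (0 ≤ nx ∧ nx < (bc'.length : Int) ∧ 0 ≤ ny ∧ ny < (bc'.length : Int)) ∧ pvGet2 bc' nx ny = p
        then acc ++ [(nx, ny)] else acc) []
      rgLoop p fuel bc' (push ++ st) (k + 1)
    else rgLoop p fuel bc st k

def removeGroup (bc : List (List String)) (x y : Int) (p : String) : Int × List (List String) :=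
  rgLoop p (5 * bc.length * bc.length + 2) bc [(x, y)] 0

-- the body of A's for-loop over the four deltas, threading (board, captured)
def aStep (x y : Int) (opp : String) (st : List (List String) × Int) (d : Int × Int) : List (List String) × Int :=
  let nx := x + d.1
  let ny := y + d.2
  if (0 ≤ nx ∧ nx < (st.1.length : Int) ∧ 0 ≤ ny ∧ ny < (st.1.length : Int)) ∧ pvGet2 st.1 nx ny = opp then
    if isGroupCaptured st.1 nx ny opp then
      let r := removeGroup st.1 nx ny opp
      (r.2, st.2 + r.1)
    else st
  else st

-- `prisoners[current_player] += captured` only mutates prisoners (KeyError excluded by Pre_);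
-- the return value is `captured`.
def capture_stones (board : List (List String)) (x : Int) (y : Int) (current_player : String) (prisoners : List (String × Int)) : Int :=
  let opponent := if current_player = "X" then "O" else "X"
  (pvDeltas.foldl (aStep x y opponent) (board, 0)).2

-- ===== PORT B =====
-- the four neighbour cells of c, in B's iteration order
def pvNbrs (c : Int × Int) : List (Int × Int) :=
  [(c.1 - 1, c.2), (c.1 + 1, c.2), (c.1, c.2 - 1), (c.1, c.2 + 1)]

-- B's while-loop: one flood fill collecting the group and a liberty flag (board is never
-- mutated during the traversal); stack top at the HEAD; Nat argument is a fuel/totality guard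
def floodLoop (b : List (List String)) (p : String) : Nat → List (Int × Int) → List (Int × Int) → Bool → List (Int × Int) × Bool
  | 0, _, grp, lib => (grp, lib)
  | _ + 1, [], grp, lib => (grp, lib)
  | fuel + 1, c :: st, grp, lib =>
    if c ∈ grp then floodLoop b p fuel st grp lib
    else
      let scan := (pvNbrs c).foldl (fun (acc : List (Int × Int) × Bool) n =>
        if 0 ≤ n.1 ∧ n.1 < (b.length : Int) ∧ 0 ≤ n.2 ∧ n.2 < (b.length : Int) then
          if pvGet2 b n.1 n.2 = "." then (acc.1, true)
          else if pvGet2 b n.1 n.2 = p then (acc.1 ++ [n], acc.2)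
          else acc
        else acc) ([], lib)
      floodLoop b p fuel (scan.1 ++ st) (grp ++ [c]) scan.2

-- `for cx, cy in group: board[cx][cy] = '.'`
def clearGroup (bc : List (List String)) (grp : List (Int × Int)) : List (List String) :=
  grp.foldl (fun b c => pvSet2 b c.1 c.2 ".") bc

-- the body of B's for-loop over the four neighbour cells
def bStep (opp : String) (st : List (List String) × Int) (n : Int × Int) : List (List String) × Int :=
  if (0 ≤ n.1 ∧ n.1 < (st.1.length : Int) ∧ 0 ≤ n.2 ∧ n.2 < (st.1.length : Int)) ∧ pvGet2 st.1 n.1 n.2 = opp then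
    let r := floodLoop st.1 opp (5 * st.1.length * st.1.length + 2) [n] [] false
    if r.2 then st else (clearGroup st.1 r.1, st.2 + (r.1.length : Int))
  else st

def capture_stones_alt (board : List (List String)) (x : Int) (y : Int) (current_player : String) (prisoners : List (String × Int)) : Int :=
  let opponent := if current_player = "X" then "O" else "X"
  (([(x - 1, y), (x + 1, y), (x, y - 1), (x, y + 1)] : List (Int × Int)).foldl (bStep opponent) (board, 0)).2

-- ===== PRECONDITION & SPEC =====
-- Pre_ excludes (a) prisoners lists without the current player's key (A raises KeyError) and
-- (b) ragged boards on which A's flood fill could read past a short row (IndexError); ragged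
-- boards are re-admitted when no in-bounds neighbour of (x, y) holds an opponent stone, since A
-- then returns 0 without recursing.  This shape condition is slightly wider than the exact
-- crash set: on a ragged board whose group search happens to stay on long rows A still returns.
def Pre_capture_stones (board : List (List String)) (x : Int) (y : Int) (current_player : String) (prisoners : List (String × Int)) : Prop :=
  (∃ pr ∈ prisoners, pr.1 = current_player) ∧
  ((∀ row ∈ board, board.length ≤ row.length) ∨
    (∀ n ∈ ([(x - 1, y), (x + 1, y), (x, y - 1), (x, y + 1)] : List (Int × Int)),
      (0 ≤ n.1 ∧ n.1 < (board.length : Int) ∧ 0 ≤ n.2 ∧ n.2 < (board.length : Int)) →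
        (n.2 < ((((PySem.List.pyGet? board n.1).getD []).length : Int)) ∧
          pvGet2 board n.1 n.2 ≠ (if current_player = "X" then "O" else "X"))))

instance (board : List (List String)) (x : Int) (y : Int) (current_player : String) (prisoners : List (String × Int)) : Decidable (Pre_capture_stones board x y current_player prisoners) := by
  unfold Pre_capture_stones; infer_instance

def pvWitness_capture_stones : List (List String) × Int × Int × String × (List (String × Int)) :=
  ([["X", "O"], [".", "."]], 0, 0, "X", [("X", 0), ("O", 0)])

def Spec_capture_stones (board : List (List String)) (x : Int) (y : Int) (current_player : String) (prisoners : List (String × Int)) (out : Int) : Prop := out = capture_stones_alt board x y current_player prisoners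
instance (board : List (List String)) (x : Int) (y : Int) (current_player : String) (prisoners : List (String × Int)) (out : Int) : Decidable (Spec_capture_stones board x y current_player prisoners out) := by unfold Spec_capture_stones; infer_instance

-- ===== CLAIM (what is proved, stated in full; the proofs are below) =====
def Claim_equal_capture_stones : Prop := ∀ (board : List (List String)) (x : Int) (y : Int) (current_player : String) (prisoners : List (String × Int)), Dom_capture_stones board x y current_player prisoners → Pre_capture_stones board x y current_player prisoners → Spec_capture_stones board x y current_player prisoners (capture_stones board x y current_player prisoners)

-- ===== LEMMAS AND PROOFS =====
-- ---------- proof-side relational layer ----------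

-- cell c is on the size×size board
abbrev inB (b : List (List String)) (c : Int × Int) : Prop :=
  0 ≤ c.1 ∧ c.1 < (b.length : Int) ∧ 0 ≤ c.2 ∧ c.2 < (b.length : Int)

-- connected group of p-stones containing s (edges: the four neighbours)
inductive ReachG (b : List (List String)) (p : String) (s : Int × Int) : (Int × Int) → Prop
  | refl : ReachG b p s s
  | step {c d : Int × Int} : ReachG b p s c → d ∈ pvNbrs c → inB b d → pvGet2 b d.1 d.2 = p →
      ReachG b p s d

-- semantics of A's has_liberties: a liberty is reachable from c
inductive LibR (b : List (List String)) (p : String) : (Int × Int) → Prop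
  | dot {c : Int × Int} : pvGet2 b c.1 c.2 = "." → LibR b p c
  | via {c d : Int × Int} : pvGet2 b c.1 c.2 = p → d ∈ pvNbrs c → inB b d → LibR b p d →
      LibR b p c

-- c touches an empty point
def dotNbr (b : List (List String)) (c : Int × Int) : Prop :=
  ∃ d ∈ pvNbrs c, inB b d ∧ pvGet2 b d.1 d.2 = "."


theorem length_pvSet2 (b : List (List String)) (i j : Int) (v : String) :
    (pvSet2 b i j v).length = b.length := by
  simp [pvSet2]

theorem rowlen_pvSet2 (b : List (List String)) (i j : Int) (v : String) (k : Nat) :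
    (((pvSet2 b i j v)[k]?).getD []).length = ((b[k]?).getD []).length := by
  unfold pvSet2
  by_cases hk : i.toNat = k
  · subst hk
    by_cases hlt : i.toNat < b.length
    · simp [List.getElem?_set_self hlt, List.getD, List.getElem?_eq_getElem hlt]
    · simp [hlt]
  · simp [List.getElem?_set_ne hk]

theorem pvGet2_nonneg (b : List (List String)) (i j : Int) (hi : 0 ≤ i) (hj : 0 ≤ j) :
    pvGet2 b i j = ((b[i.toNat]?.getD [])[j.toNat]?).getD "" := by
  simp [pvGet2, PySem.List.pyGet?_of_nonneg _ hi, PySem.List.pyGet?_of_nonneg _ hj]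

theorem pvGet2_valid (b : List (List String)) (i j : Int) (hi : 0 ≤ i) (hj : 0 ≤ j)
    (h : pvGet2 b i j ≠ "") :
    i.toNat < b.length ∧ j.toNat < (b[i.toNat]?.getD []).length := by
  rw [pvGet2_nonneg b i j hi hj] at h
  constructor
  · by_contra hlt
    simp [List.getElem?_eq_none (le_of_not_gt hlt)] at h
  · by_contra hlt
    simp [List.getElem?_eq_none (le_of_not_gt hlt)] at h

theorem pvGet2_set_self (b : List (List String)) (i j : Int) (v : String)
    (hi : 0 ≤ i) (hj : 0 ≤ j) (h : pvGet2 b i j ≠ "") :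
    pvGet2 (pvSet2 b i j v) i j = v := by
  obtain ⟨h1, h2⟩ := pvGet2_valid b i j hi hj h
  rw [pvGet2_nonneg _ _ _ hi hj]
  unfold pvSet2
  rw [List.getElem?_set_self (by simpa using h1)]
  simp only [Option.getD_some]
  rw [List.getElem?_set_self]
  · simp
  · simpa [List.getD] using h2

theorem pvGet2_set_other (b : List (List String)) (i j i' j' : Int) (v : String)
    (hi : 0 ≤ i) (hj : 0 ≤ j) (hi' : 0 ≤ i') (hj' : 0 ≤ j')
    (hne : (i', j') ≠ (i, j)) :
    pvGet2 (pvSet2 b i j v) i' j' = pvGet2 b i' j' := by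
  rw [pvGet2_nonneg _ _ _ hi' hj', pvGet2_nonneg _ _ _ hi' hj']
  unfold pvSet2
  by_cases hrow : i.toNat = i'.toNat
  · have hij : i = i' := by omega
    have hjj : j ≠ j' := by
      intro hcon; exact hne (by simp [hij, hcon])
    rw [← hrow]
    by_cases hlt : i.toNat < b.length
    · rw [List.getElem?_set_self hlt]
      simp only [Option.getD_some]
      rw [List.getElem?_set_ne (by omega)]
      simp [List.getD]
    · rw [List.getElem?_set, if_pos rfl, if_neg hlt]
      simp [List.getElem?_eq_none (le_of_not_gt hlt)]
  · rw [List.getElem?_set_ne hrow]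

theorem length_clearGroup (b : List (List String)) (D : List (Int × Int)) :
    (clearGroup b D).length = b.length := by
  induction D generalizing b with
  | nil => rfl
  | cons d D ih => simp [clearGroup, List.foldl_cons] at ih ⊢; rw [ih, length_pvSet2]

theorem rowlen_clearGroup (b : List (List String)) (D : List (Int × Int)) (k : Nat) :
    (((clearGroup b D)[k]?).getD []).length = ((b[k]?).getD []).length := by
  induction D generalizing b with
  | nil => rfl
  | cons d D ih => simp only [clearGroup, List.foldl_cons] at ih ⊢; rw [ih, rowlen_pvSet2]

theorem pvGet2_clearGroup : ∀ (D : List (Int × Int)) (b : List (List String)),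
    (∀ d ∈ D, 0 ≤ d.1 ∧ 0 ≤ d.2 ∧ pvGet2 b d.1 d.2 ≠ "") → ∀ (i j : Int),
    0 ≤ i → 0 ≤ j →
    pvGet2 (clearGroup b D) i j = if (i, j) ∈ D then "." else pvGet2 b i j := by
  intro D
  induction D with
  | nil => intro b _ i j _ _; simp [clearGroup]
  | cons d D ih =>
    intro b HV i j hi hj
    obtain ⟨hd1, hd2, hd3⟩ := HV d (by simp)
    have hset : ∀ d' : Int × Int, 0 ≤ d'.1 → 0 ≤ d'.2 →
        pvGet2 (pvSet2 b d.1 d.2 ".") d'.1 d'.2 = if d' = d then "." else pvGet2 b d'.1 d'.2 := by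
      intro d' h1 h2
      by_cases he : d' = d
      · rw [he, if_pos rfl, pvGet2_set_self b d.1 d.2 "." hd1 hd2 hd3]
      · rw [if_neg he, pvGet2_set_other b d.1 d.2 d'.1 d'.2 "." hd1 hd2 h1 h2]
        intro hcon
        exact he (Prod.ext (congrArg Prod.fst hcon) (congrArg Prod.snd hcon))
    have HV' : ∀ d' ∈ D, 0 ≤ d'.1 ∧ 0 ≤ d'.2 ∧ pvGet2 (pvSet2 b d.1 d.2 ".") d'.1 d'.2 ≠ "" := by
      intro d' hmem
      obtain ⟨h1, h2, h3⟩ := HV d' (by simp [hmem])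
      refine ⟨h1, h2, ?_⟩
      rw [hset d' h1 h2]
      split <;> simp_all
    have hstep : clearGroup b (d :: D) = clearGroup (pvSet2 b d.1 d.2 ".") D := by
      simp [clearGroup, List.foldl_cons]
    rw [hstep, ih _ HV' i j hi hj, hset (i, j) hi hj]
    by_cases hmem : (i, j) ∈ D
    · simp [hmem]
    · by_cases he : (i, j) = d <;> simp [hmem, he]

theorem board_ext (b1 b2 : List (List String)) (hl : b1.length = b2.length)
    (hr : ∀ k : Nat, ((b1[k]?).getD []).length = ((b2[k]?).getD []).length)
    (hc : ∀ k l : Nat, pvGet2 b1 (k : Int) (l : Int) = pvGet2 b2 (k : Int) (l : Int)) :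
    b1 = b2 := by
  apply List.ext_getElem hl
  intro k hk1 hk2
  apply List.ext_getElem
  · have := hr k
    simpa [List.getElem?_eq_getElem, hk1, hk2] using this
  · intro l hl1 hl2
    have := hc k l
    rw [pvGet2_nonneg _ _ _ (by positivity) (by positivity),
        pvGet2_nonneg _ _ _ (by positivity) (by positivity)] at this
    simpa [Int.toNat_natCast, List.getElem?_eq_getElem, hk1, hk2, hl1, hl2] using this

theorem foldl_push {α β : Type} (f : α → β) (P : β → Prop) [DecidablePred P] :
    ∀ (ns : List α) (a : List β),
      ns.foldl (fun acc d => if P (f d) then acc ++ [f d] else acc) a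
        = a ++ (ns.map f).filter (fun n => decide (P n)) := by
  intro ns
  induction ns with
  | nil => simp
  | cons n ns ih =>
    intro a
    simp only [List.foldl_cons, List.map_cons, List.filter_cons]
    by_cases h : P (f n) <;> simp [h, ih]

theorem nbrs_map (c : Int × Int) :
    pvNbrs c = pvDeltas.map (fun d => (c.1 + d.1, c.2 + d.2)) := by
  simp [pvNbrs, pvDeltas, Prod.ext_iff]
  omega

theorem length_le_sq (b : List (List String)) (l : List (Int × Int))
    (hnd : l.Nodup) (hb : ∀ c ∈ l, inB b c) : l.length ≤ b.length * b.length := by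
  classical
  have hsub : l.toFinset ⊆ (Finset.Ico (0 : Int) (b.length : Int)) ×ˢ (Finset.Ico (0 : Int) (b.length : Int)) := by
    intro c hc
    obtain ⟨h1, h2, h3, h4⟩ := hb c (List.mem_toFinset.mp hc)
    simp [Finset.mem_product, Finset.mem_Ico]
    exact ⟨⟨h1, h2⟩, h3, h4⟩
  have hcard := Finset.card_le_card hsub
  rw [List.toFinset_card_of_nodup hnd] at hcard
  simpa using hcard

theorem reach_inB_cell {b : List (List String)} {p : String} {s c : Int × Int}
    (h : ReachG b p s c) (hs : inB b s) (hc : pvGet2 b s.1 s.2 = p) :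
    inB b c ∧ pvGet2 b c.1 c.2 = p := by
  induction h with
  | refl => exact ⟨hs, hc⟩
  | step _ _ hd hcell _ => exact ⟨hd, hcell⟩

theorem reach_trans {b : List (List String)} {p : String} {s c e : Int × Int}
    (h1 : ReachG b p s c) (h2 : ReachG b p c e) : ReachG b p s e := by
  induction h2 with
  | refl => exact h1
  | step _ hmem hinB hcell ih => exact ReachG.step ih hmem hinB hcell

theorem libr_cell {b : List (List String)} {p : String} {c : Int × Int}
    (h : LibR b p c) : pvGet2 b c.1 c.2 = "." ∨ pvGet2 b c.1 c.2 = p := by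
  cases h with
  | dot h => exact Or.inl h
  | via h _ _ _ => exact Or.inr h

theorem libr_iff {b : List (List String)} {p : String} (hp : p ≠ ".") {s : Int × Int}
    (hs : inB b s) (hsp : pvGet2 b s.1 s.2 = p) :
    LibR b p s ↔ ∃ c, ReachG b p s c ∧ dotNbr b c := by
  constructor
  · intro h
    have key : ∀ c : Int × Int, LibR b p c → pvGet2 b c.1 c.2 = p →
        ∃ e, ReachG b p c e ∧ dotNbr b e := by
      intro c hc
      induction hc with
      | dot hdot => intro hcp; exact absurd (hcp.symm.trans hdot) hp
      | @via c d hcell hmem hinB hlib ih =>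
        intro _
        rcases libr_cell hlib with hdot | hdp
        · exact ⟨c, ReachG.refl, d, hmem, hinB, hdot⟩
        · obtain ⟨e, he1, he2⟩ := ih hdp
          exact ⟨e, reach_trans (ReachG.step ReachG.refl hmem hinB hdp) he1, he2⟩
    exact key s h hsp
  · rintro ⟨c, hreach, hdot⟩
    have hc := reach_inB_cell hreach hs hsp
    have hlibc : LibR b p c := by
      obtain ⟨d, hmem, hinB, hcell⟩ := hdot
      exact LibR.via hc.2 hmem hinB (LibR.dot hcell)
    clear hdot
    induction hreach with
    | refl => exact hlibc
    | @step c' d hr hmem hinB hcell ih =>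
      have hc' := reach_inB_cell hr hs hsp
      exact ih hc' (LibR.via hc'.2 hmem hinB hlibc)

theorem nodup_subset_length {α : Type} [DecidableEq α] {l1 l2 : List α}
    (h1 : l1.Nodup) (hsub : l1 ⊆ l2) : l1.length ≤ l2.length := by
  calc l1.length = l1.toFinset.card := (List.toFinset_card_of_nodup h1).symm
    _ ≤ l2.toFinset.card := Finset.card_le_card (fun a ha => by
        simp only [List.mem_toFinset] at ha ⊢; exact hsub ha)
    _ ≤ l2.length := l2.toFinset_card_le

theorem set_add_not_mem {α : Type} [BEq α] [LawfulBEq α] {s : List α} {x : α} (h : x ∉ s) :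
    PySem.Set.add s x = s ++ [x] := by
  simp [PySem.Set.add, PySem.Set.contains, List.contains_eq_mem, h]

theorem hl_succ (b : List (List String)) (p : String) (fuel : Nat) (x y : Int)
    (vis : List (Int × Int)) :
    hasLiberties b p (fuel + 1) x y vis =
      if (x, y) ∈ vis then (false, vis)
      else
        let vis' := PySem.Set.add vis (x, y)
        if pvGet2 b x y = "." then (true, vis')
        else if pvGet2 b x y ≠ p then (false, vis')
        else hlLoop b p fuel x y pvDeltas vis' := by
  rw [hasLiberties]

theorem hlLoop_nil (b : List (List String)) (p : String) (fuel : Nat) (x y : Int)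
    (vis : List (Int × Int)) : hlLoop b p fuel x y [] vis = (false, vis) := by
  rw [hlLoop]

theorem hlLoop_cons (b : List (List String)) (p : String) (fuel : Nat) (x y : Int)
    (d : Int × Int) (ds : List (Int × Int)) (vis : List (Int × Int)) :
    hlLoop b p fuel x y (d :: ds) vis =
      (if 0 ≤ x + d.1 ∧ x + d.1 < (b.length : Int) ∧ 0 ≤ y + d.2 ∧ y + d.2 < (b.length : Int) then
        match hasLiberties b p fuel (x + d.1) (y + d.2) vis with
        | (true, vis2) => (true, vis2)
        | (false, vis2) => hlLoop b p fuel x y ds vis2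
      else hlLoop b p fuel x y ds vis) := by
  rw [hlLoop]

-- conclusion of hl_spec, as a predicate on the result pair
def HLC (b : List (List String)) (p : String) (x y : Int) (vis : List (Int × Int))
    (res : Bool × List (Int × Int)) : Prop :=
  vis ⊆ res.2 ∧ res.2.Nodup ∧ (∀ v ∈ res.2, inB b v) ∧
  (res.1 = true → LibR b p (x, y)) ∧
  (res.1 = false →
    (x, y) ∈ res.2 ∧
    ∀ w ∈ res.2, w ∉ vis →
      pvGet2 b w.1 w.2 ≠ "." ∧
      (pvGet2 b w.1 w.2 = p → ∀ nb ∈ pvNbrs w, inB b nb → nb ∈ res.2))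

theorem hlLoop_spec (b : List (List String)) (p : String) (fuel : Nat)
    (IH : ∀ (x y : Int) (vis : List (Int × Int)), inB b (x, y) → vis.Nodup →
      (∀ v ∈ vis, inB b v) → b.length * b.length + 1 ≤ fuel + vis.length →
      HLC b p x y vis (hasLiberties b p fuel x y vis)) :
    ∀ (ds : List (Int × Int)) (x y : Int) (vis : List (Int × Int)),
      vis.Nodup → (∀ v ∈ vis, inB b v) →
      b.length * b.length + 1 ≤ fuel + vis.length →
      vis ⊆ (hlLoop b p fuel x y ds vis).2 ∧
      (hlLoop b p fuel x y ds vis).2.Nodup ∧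
      (∀ v ∈ (hlLoop b p fuel x y ds vis).2, inB b v) ∧
      ((hlLoop b p fuel x y ds vis).1 = true →
        ∃ d ∈ ds, inB b (x + d.1, y + d.2) ∧ LibR b p (x + d.1, y + d.2)) ∧
      ((hlLoop b p fuel x y ds vis).1 = false →
        (∀ d ∈ ds, inB b (x + d.1, y + d.2) → (x + d.1, y + d.2) ∈ (hlLoop b p fuel x y ds vis).2) ∧
        ∀ w ∈ (hlLoop b p fuel x y ds vis).2, w ∉ vis →
          pvGet2 b w.1 w.2 ≠ "." ∧
          (pvGet2 b w.1 w.2 = p →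
            ∀ nb ∈ pvNbrs w, inB b nb → nb ∈ (hlLoop b p fuel x y ds vis).2)) := by
  intro ds
  induction ds with
  | nil =>
    intro x y vis hnd hinb hfuel
    simp only [hlLoop_nil]
    refine ⟨fun a ha => ha, hnd, hinb, by simp, ?_⟩
    intro _
    exact ⟨by simp, fun w hw hwn => absurd hw hwn⟩
  | cons d ds ih =>
    intro x y vis hnd hinb hfuel
    rw [hlLoop_cons]
    by_cases hin : 0 ≤ x + d.1 ∧ x + d.1 < (b.length : Int) ∧ 0 ≤ y + d.2 ∧ y + d.2 < (b.length : Int)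
    · rw [if_pos hin]
      have hin' : inB b (x + d.1, y + d.2) := hin
      have hA := IH (x + d.1) (y + d.2) vis hin' hnd hinb hfuel
      obtain ⟨A1, A2, A3, A4, A5⟩ := hA
      rcases hres : hasLiberties b p fuel (x + d.1) (y + d.2) vis with ⟨r1, vis2⟩
      rw [hres] at A1 A2 A3 A4 A5
      cases r1 with
      | true =>
        simp only
        refine ⟨A1, A2, A3, ?_, ?_⟩
        · intro _; exact ⟨d, by simp, hin', A4 rfl⟩
        · intro hcon; exact absurd hcon (by simp)
      | false =>
        simp only
        obtain ⟨C1, C2⟩ := A5 rfl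
        have hlen : vis.length ≤ vis2.length := nodup_subset_length hnd A1
        obtain ⟨B1, B2, B3, B4, B5⟩ := ih x y vis2 A2 A3 (by omega)
        refine ⟨fun a ha => B1 (A1 ha), B2, B3, ?_, ?_⟩
        · intro ht
          obtain ⟨d', hd', h1, h2⟩ := B4 ht
          exact ⟨d', by simp [hd'], h1, h2⟩
        · intro hf
          obtain ⟨D1, D2⟩ := B5 hf
          constructor
          · intro d' hd' hin2
            rcases List.mem_cons.mp hd' with he | hm
            · subst he; exact B1 C1
            · exact D1 d' hm hin2
          · intro w hw hwv
            by_cases hw2 : w ∈ vis2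
            · obtain ⟨E1, E2⟩ := C2 w hw2 hwv
              exact ⟨E1, fun hp nb hnb hnbin => B1 (E2 hp nb hnb hnbin)⟩
            · exact D2 w hw hw2
    · rw [if_neg hin]
      obtain ⟨B1, B2, B3, B4, B5⟩ := ih x y vis hnd hinb hfuel
      refine ⟨B1, B2, B3, ?_, ?_⟩
      · intro ht
        obtain ⟨d', hd', h1, h2⟩ := B4 ht
        exact ⟨d', by simp [hd'], h1, h2⟩
      · intro hf
        obtain ⟨D1, D2⟩ := B5 hf
        refine ⟨?_, D2⟩
        intro d' hd' hin2
        rcases List.mem_cons.mp hd' with he | hm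
        · subst he; exact absurd hin2 hin
        · exact D1 d' hm hin2

theorem hl_spec (b : List (List String)) (p : String) :
    ∀ (fuel : Nat) (x y : Int) (vis : List (Int × Int)),
      inB b (x, y) → vis.Nodup → (∀ v ∈ vis, inB b v) →
      b.length * b.length + 1 ≤ fuel + vis.length →
      HLC b p x y vis (hasLiberties b p fuel x y vis) := by
  intro fuel
  induction fuel with
  | zero =>
    intro x y vis hin hnd hinb hfuel
    exfalso
    have := length_le_sq b vis hnd hinb
    omega
  | succ fuel ihf =>
    intro x y vis hin hnd hinb hfuel
    rw [hl_succ]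
    by_cases hmem : (x, y) ∈ vis
    · rw [if_pos hmem]
      exact ⟨fun a ha => ha, hnd, hinb, by simp, fun _ =>
        ⟨hmem, fun w hw hwn => absurd hw hwn⟩⟩
    · rw [if_neg hmem]
      simp only
      rw [set_add_not_mem hmem]
      have hnd' : (vis ++ [(x, y)]).Nodup := by
        simp [List.nodup_append, hnd]
        intro a c hac ha hc
        exact hmem (by rw [← ha, ← hc]; exact hac)
      have hinb' : ∀ v ∈ vis ++ [(x, y)], inB b v := by
        intro v hv
        rcases List.mem_append.mp hv with h | h
        · exact hinb v h
        · simp at h; subst h; exact hin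
      have hsub' : vis ⊆ vis ++ [(x, y)] := by
        intro a ha; exact List.mem_append.mpr (Or.inl ha)
      have hxy' : (x, y) ∈ vis ++ [(x, y)] := by simp
      by_cases hdot : pvGet2 b x y = "."
      · rw [if_pos hdot]
        exact ⟨hsub', hnd', hinb', fun _ => LibR.dot hdot, by simp⟩
      · rw [if_neg hdot]
        by_cases hne : pvGet2 b x y ≠ p
        · rw [if_pos hne]
          refine ⟨hsub', hnd', hinb', by simp, fun _ => ⟨hxy', ?_⟩⟩
          intro w hw hwv
          have hwxy : w = (x, y) := by
            rcases List.mem_append.mp hw with h | h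
            · exact absurd h hwv
            · simpa using h
          subst hwxy
          exact ⟨hdot, fun hcp => absurd hcp hne⟩
        · rw [if_neg hne]
          replace hne : pvGet2 b x y = p := not_ne_iff.mp hne
          have hlen : (vis ++ [(x, y)]).length = vis.length + 1 := by simp
          obtain ⟨B1, B2, B3, B4, B5⟩ := hlLoop_spec b p fuel (fun x' y' vis' h1 h2 h3 h4 =>
            ihf x' y' vis' h1 h2 h3 h4) pvDeltas x y (vis ++ [(x, y)]) hnd' hinb' (by omega)
          refine ⟨fun a ha => B1 (hsub' ha), B2, B3, ?_, ?_⟩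
          · intro ht
            obtain ⟨d, _, h1, h2⟩ := B4 ht
            refine LibR.via hne ?_ h1 h2
            rw [nbrs_map]
            exact List.mem_map.mpr ⟨d, by simp_all⟩
          · intro hf
            obtain ⟨D1, D2⟩ := B5 hf
            refine ⟨B1 hxy', ?_⟩
            intro w hw hwv
            by_cases hwxy : w = (x, y)
            · subst hwxy
              refine ⟨hdot, ?_⟩
              intro _ nb hnb hnbin
              rw [nbrs_map] at hnb
              obtain ⟨d, hd, he⟩ := List.mem_map.mp hnb
              subst he
              exact D1 d hd hnbin
            · have : w ∉ vis ++ [(x, y)] := by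
                intro hcon
                rcases List.mem_append.mp hcon with h | h
                · exact hwv h
                · exact hwxy (by simpa using h)
              exact D2 w hw this

theorem igc_iff (b : List (List String)) (p : String) (s : Int × Int)
    (hs : inB b s) :
    (isGroupCaptured b s.1 s.2 p = true ↔ ¬ LibR b p s) := by
  obtain ⟨sx, sy⟩ := s
  have H := hl_spec b p (b.length * b.length + 1) sx sy [] hs List.nodup_nil
    (by simp) (by omega)
  obtain ⟨H1, H2, H3, H4, H5⟩ := H
  unfold isGroupCaptured
  rcases hres : (hasLiberties b p (b.length * b.length + 1) sx sy []) with ⟨r, V⟩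
  rw [hres] at H4 H5
  cases r with
  | true => simp [H4 rfl]
  | false =>
    simp only [Bool.not_false]
    obtain ⟨C1, C2⟩ := H5 rfl
    have key : ∀ c : Int × Int, LibR b p c → c ∈ V → False := by
      intro c hc
      induction hc with
      | dot hdot => intro hcv; exact (C2 _ hcv (by simp)).1 hdot
      | via hcell hmem hinB _ ih =>
        intro hcv
        exact ih ((C2 _ hcv (by simp)).2 hcell _ hmem hinB)
    simp only [true_iff]
    intro hlib
    exact key _ hlib C1

theorem rg_push (bc' : List (List String)) (p : String) (c : Int × Int) :
    pvDeltas.foldl (fun acc d =>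
      if (0 ≤ c.1 + d.1 ∧ c.1 + d.1 < (bc'.length : Int) ∧ 0 ≤ c.2 + d.2 ∧ c.2 + d.2 < (bc'.length : Int)) ∧
          pvGet2 bc' (c.1 + d.1) (c.2 + d.2) = p
      then acc ++ [(c.1 + d.1, c.2 + d.2)] else acc) []
    = (pvNbrs c).filter (fun n => decide
        ((0 ≤ n.1 ∧ n.1 < (bc'.length : Int) ∧ 0 ≤ n.2 ∧ n.2 < (bc'.length : Int)) ∧
          pvGet2 bc' n.1 n.2 = p)) := by
  rw [nbrs_map]
  have := foldl_push (fun d : Int × Int => (c.1 + d.1, c.2 + d.2))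
    (fun n : Int × Int => (0 ≤ n.1 ∧ n.1 < (bc'.length : Int) ∧ 0 ≤ n.2 ∧ n.2 < (bc'.length : Int)) ∧
      pvGet2 bc' n.1 n.2 = p) pvDeltas []
  simpa using this

theorem length_pvNbrs (c : Int × Int) : (pvNbrs c).length = 4 := by simp [pvNbrs]

theorem rg_spec (b : List (List String)) (p : String) (hp : p ≠ ".") (hp0 : p ≠ "")
    (s : Int × Int) (hs : inB b s) (hsp : pvGet2 b s.1 s.2 = p) :
    ∀ (fuel : Nat) (D st : List (Int × Int)),
      D.Nodup → (∀ d ∈ D, ReachG b p s d) → (∀ t ∈ st, ReachG b p s t) →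
      (∀ d ∈ D, ∀ nb ∈ pvNbrs d, inB b nb → pvGet2 b nb.1 nb.2 = p → nb ∈ D ∨ nb ∈ st) →
      (s ∈ D ∨ s ∈ st) →
      5 * (b.length * b.length) + st.length + 1 ≤ fuel + 5 * D.length →
      ∃ D', rgLoop p fuel (clearGroup b D) st ((D.length : Int)) = ((D'.length : Int), clearGroup b D') ∧
        D'.Nodup ∧ (∀ c, c ∈ D' ↔ ReachG b p s c) := by
  intro fuel
  induction fuel with
  | zero =>
    intro D st hnd hD hst hcov hanch hfuel
    exfalso
    have hle : D.length ≤ b.length * b.length :=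
      length_le_sq b D hnd (fun d hd => (reach_inB_cell (hD d hd) hs hsp).1)
    omega
  | succ fuel ih =>
    intro D st hnd hD hst hcov hanch hfuel
    cases st with
    | nil =>
      refine ⟨D, by simp [rgLoop], hnd, ?_⟩
      intro c
      constructor
      · exact hD c
      · intro hr
        induction hr with
        | refl =>
          rcases hanch with h | h
          · exact h
          · exact absurd h (by simp)
        | @step c' d hr hmem hinB hcell ihr =>
          rcases hcov c' ihr d hmem hinB hcell with h | h
          · exact h
          · simp at h
    | cons c st' =>
      have hcR := hst c (by simp)
      obtain ⟨hcin, hccell⟩ := reach_inB_cell hcR hs hsp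
      have HV : ∀ d ∈ D, 0 ≤ d.1 ∧ 0 ≤ d.2 ∧ pvGet2 b d.1 d.2 ≠ "" := by
        intro d hd
        obtain ⟨h1, h2⟩ := reach_inB_cell (hD d hd) hs hsp
        exact ⟨h1.1, h1.2.2.1, by rw [h2]; exact hp0⟩
      have hget : pvGet2 (clearGroup b D) c.1 c.2 = if c ∈ D then "." else pvGet2 b c.1 c.2 := by
        have := pvGet2_clearGroup D b HV c.1 c.2 hcin.1 hcin.2.2.1
        simpa using this
      simp only [rgLoop]
      by_cases hcD : c ∈ D
      · rw [if_neg (by rw [hget, if_pos hcD]; exact fun h => hp h.symm)]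
        refine ih D st' hnd hD (fun t ht => hst t (by simp [ht])) ?_ ?_ (by simp at hfuel ⊢; omega)
        · intro d hd nb hnb h1 h2
          rcases hcov d hd nb hnb h1 h2 with h | h
          · exact Or.inl h
          · rcases List.mem_cons.mp h with he | hm
            · exact Or.inl (he ▸ hcD)
            · exact Or.inr hm
        · rcases hanch with h | h
          · exact Or.inl h
          · rcases List.mem_cons.mp h with he | hm
            · exact Or.inl (he ▸ hcD)
            · exact Or.inr hm
      · rw [if_pos (by rw [hget, if_neg hcD]; exact hccell)]
        simp only [rg_push]
        have hclear : pvSet2 (clearGroup b D) c.1 c.2 "." = clearGroup b (D ++ [c]) := by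
          simp [clearGroup, List.foldl_append]
        set D2 := D ++ [c] with hD2def
        have hnd2 : D2.Nodup := by
          simp [hD2def, List.nodup_append, hnd]
          intro a c' hac he
          exact hcD (by rw [← he]; exact hac)
        have hD2 : ∀ d ∈ D2, ReachG b p s d := by
          intro d hd
          rcases List.mem_append.mp hd with h | h
          · exact hD d h
          · simp at h; subst h; exact hcR
        have HV2 : ∀ d ∈ D2, 0 ≤ d.1 ∧ 0 ≤ d.2 ∧ pvGet2 b d.1 d.2 ≠ "" := by
          intro d hd
          obtain ⟨h1, h2⟩ := reach_inB_cell (hD2 d hd) hs hsp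
          exact ⟨h1.1, h1.2.2.1, by rw [h2]; exact hp0⟩
        have hlen2 : (clearGroup b D2).length = b.length := length_clearGroup b D2
        have hget2 : ∀ n : Int × Int, 0 ≤ n.1 → 0 ≤ n.2 →
            pvGet2 (clearGroup b D2) n.1 n.2 = if n ∈ D2 then "." else pvGet2 b n.1 n.2 := by
          intro n h1 h2
          have := pvGet2_clearGroup D2 b HV2 n.1 n.2 h1 h2
          simpa using this
        rw [hclear]
        set push := (pvNbrs c).filter (fun n => decide
          ((0 ≤ n.1 ∧ n.1 < ((clearGroup b D2).length : Int) ∧ 0 ≤ n.2 ∧ n.2 < ((clearGroup b D2).length : Int)) ∧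
            pvGet2 (clearGroup b D2) n.1 n.2 = p)) with hpushdef
        have hpushmem : ∀ n, n ∈ push ↔ n ∈ pvNbrs c ∧ inB b n ∧ n ∉ D2 ∧ pvGet2 b n.1 n.2 = p := by
          intro n
          rw [hpushdef, List.mem_filter]
          simp only [decide_eq_true_eq]
          constructor
          · rintro ⟨hmem, ⟨g1, g2, g3, g4⟩, g5⟩
            rw [hlen2] at g2 g4
            have hin : inB b n := ⟨g1, g2, g3, g4⟩
            rw [hget2 n g1 g3] at g5
            by_cases hd2 : n ∈ D2
            · rw [if_pos hd2] at g5; exact absurd g5.symm hp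
            · rw [if_neg hd2] at g5; exact ⟨hmem, hin, hd2, g5⟩
          · rintro ⟨hmem, hin, hd2, hcell⟩
            refine ⟨hmem, ⟨hin.1, by rw [hlen2]; exact hin.2.1, hin.2.2.1, by rw [hlen2]; exact hin.2.2.2⟩, ?_⟩
            rw [hget2 n hin.1 hin.2.2.1, if_neg hd2]
            exact hcell
        have hpushR : ∀ n ∈ push, ReachG b p s n := by
          intro n hn
          obtain ⟨hmem, hin, _, hcell⟩ := (hpushmem n).mp hn
          exact ReachG.step hcR hmem hin hcell
        have hpushlen : push.length ≤ 4 := by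
          calc push.length ≤ (pvNbrs c).length := List.length_filter_le _ _
            _ = 4 := length_pvNbrs c
        have hklen : (D.length : Int) + 1 = (D2.length : Int) := by
          simp [hD2def]
        rw [hklen]
        refine ih D2 (push ++ st') hnd2 hD2 ?_ ?_ ?_ ?_
        · intro t ht
          rcases List.mem_append.mp ht with h | h
          · exact hpushR t h
          · exact hst t (by simp [h])
        · intro d hd nb hnb h1 h2
          rcases List.mem_append.mp hd with hdD | hdc
          · rcases hcov d hdD nb hnb h1 h2 with h | h
            · exact Or.inl (List.mem_append.mpr (Or.inl h))
            · rcases List.mem_cons.mp h with he | hm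
              · exact Or.inl (List.mem_append.mpr (Or.inr (by simp [he])))
              · exact Or.inr (List.mem_append.mpr (Or.inr hm))
          · simp at hdc
            subst hdc
            by_cases hnb2 : nb ∈ D2
            · exact Or.inl hnb2
            · exact Or.inr (List.mem_append.mpr (Or.inl ((hpushmem nb).mpr ⟨hnb, h1, hnb2, h2⟩)))
        · rcases hanch with h | h
          · exact Or.inl (List.mem_append.mpr (Or.inl h))
          · rcases List.mem_cons.mp h with he | hm
            · exact Or.inl (List.mem_append.mpr (Or.inr (by simp [he])))
            · exact Or.inr (List.mem_append.mpr (Or.inr hm))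
        · have : D2.length = D.length + 1 := by simp [hD2def]
          simp only [List.length_append, List.length_cons] at hfuel ⊢
          omega

theorem fl_scan (b : List (List String)) (p : String) (hp : p ≠ ".") :
    ∀ (ns : List (Int × Int)) (a : List (Int × Int)) (l : Bool),
      ns.foldl (fun (acc : List (Int × Int) × Bool) n =>
        if 0 ≤ n.1 ∧ n.1 < (b.length : Int) ∧ 0 ≤ n.2 ∧ n.2 < (b.length : Int) then
          if pvGet2 b n.1 n.2 = "." then (acc.1, true)
          else if pvGet2 b n.1 n.2 = p then (acc.1 ++ [n], acc.2)
          else acc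
        else acc) (a, l)
      = (a ++ ns.filter (fun n => decide (inB b n ∧ pvGet2 b n.1 n.2 = p)),
         l || ns.any (fun n => decide (inB b n ∧ pvGet2 b n.1 n.2 = "."))) := by
  intro ns
  induction ns with
  | nil => simp
  | cons n ns ih =>
    intro a l
    simp only [List.foldl_cons, List.filter_cons, List.any_cons]
    by_cases hin : 0 ≤ n.1 ∧ n.1 < (b.length : Int) ∧ 0 ≤ n.2 ∧ n.2 < (b.length : Int)
    · have hin' : inB b n := hin
      rw [if_pos hin]
      by_cases hdot : pvGet2 b n.1 n.2 = "."
      · have hnp : ¬ (inB b n ∧ pvGet2 b n.1 n.2 = p) := by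
          rintro ⟨_, hcon⟩; exact hp (hcon.symm.trans hdot)
        rw [if_pos hdot]
        simp only [ih]
        simp [hin', hdot, hp.symm]
      · rw [if_neg hdot]
        by_cases hcp : pvGet2 b n.1 n.2 = p
        · rw [if_pos hcp]
          simp only [ih]
          simp [hin', hcp, hp]
        · rw [if_neg hcp]
          simp only [ih]
          simp [hcp, hdot]
    · rw [if_neg hin]
      have hin' : ¬ inB b n := hin
      simp only [ih]
      simp [hin']

theorem flood_spec (b : List (List String)) (p : String) (hp : p ≠ ".")
    (s : Int × Int) (hs : inB b s) (hsp : pvGet2 b s.1 s.2 = p) :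
    ∀ (fuel : Nat) (st grp : List (Int × Int)) (lib : Bool),
      grp.Nodup → (∀ g ∈ grp, ReachG b p s g) → (∀ t ∈ st, ReachG b p s t) →
      (∀ g ∈ grp, ∀ nb ∈ pvNbrs g, inB b nb → pvGet2 b nb.1 nb.2 = p → nb ∈ grp ∨ nb ∈ st) →
      (s ∈ grp ∨ s ∈ st) →
      (lib = true ↔ ∃ g ∈ grp, dotNbr b g) →
      5 * (b.length * b.length) + st.length + 1 ≤ fuel + 5 * grp.length →
      ∃ G L, floodLoop b p fuel st grp lib = (G, L) ∧ G.Nodup ∧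
        (∀ c, c ∈ G ↔ ReachG b p s c) ∧
        (L = true ↔ ∃ c, ReachG b p s c ∧ dotNbr b c) := by
  intro fuel
  induction fuel with
  | zero =>
    intro st grp lib hnd hG hst hcov hanch hlib hfuel
    exfalso
    have hle : grp.length ≤ b.length * b.length :=
      length_le_sq b grp hnd (fun g hg => (reach_inB_cell (hG g hg) hs hsp).1)
    omega
  | succ fuel ih =>
    intro st grp lib hnd hG hst hcov hanch hlib hfuel
    cases st with
    | nil =>
      have hmem : ∀ c, c ∈ grp ↔ ReachG b p s c := by
        intro c
        constructor
        · exact hG c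
        · intro hr
          induction hr with
          | refl =>
            rcases hanch with h | h
            · exact h
            · exact absurd h (by simp)
          | @step c' d hr hmemd hinB hcell ihr =>
            rcases hcov c' ihr d hmemd hinB hcell with h | h
            · exact h
            · exact absurd h (by simp)
      refine ⟨grp, lib, by simp [floodLoop], hnd, hmem, ?_⟩
      rw [hlib]
      constructor
      · rintro ⟨g, h1, h2⟩; exact ⟨g, (hmem g).mp h1, h2⟩
      · rintro ⟨g, h1, h2⟩; exact ⟨g, (hmem g).mpr h1, h2⟩
    | cons c st' =>
      have hcR := hst c (by simp)
      obtain ⟨hcin, hccell⟩ := reach_inB_cell hcR hs hsp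
      simp only [floodLoop]
      by_cases hcG : c ∈ grp
      · rw [if_pos hcG]
        refine ih st' grp lib hnd hG (fun t ht => hst t (by simp [ht])) ?_ ?_ hlib (by simp at hfuel ⊢; omega)
        · intro g hg nb hnb h1 h2
          rcases hcov g hg nb hnb h1 h2 with h | h
          · exact Or.inl h
          · rcases List.mem_cons.mp h with he | hm
            · exact Or.inl (he ▸ hcG)
            · exact Or.inr hm
        · rcases hanch with h | h
          · exact Or.inl h
          · rcases List.mem_cons.mp h with he | hm
            · exact Or.inl (he ▸ hcG)
            · exact Or.inr hm
      · rw [if_neg hcG]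
        simp only [fl_scan b p hp (pvNbrs c) [] lib]
        set push := (pvNbrs c).filter (fun n => decide (inB b n ∧ pvGet2 b n.1 n.2 = p)) with hpushdef
        set grp2 := grp ++ [c] with hgrp2def
        have hnd2 : grp2.Nodup := by
          simp [hgrp2def, List.nodup_append, hnd]
          intro a c' hac he
          exact hcG (by rw [← he]; exact hac)
        have hG2 : ∀ g ∈ grp2, ReachG b p s g := by
          intro g hg
          rcases List.mem_append.mp hg with h | h
          · exact hG g h
          · simp at h; subst h; exact hcR
        have hpushmem : ∀ n, n ∈ push ↔ n ∈ pvNbrs c ∧ inB b n ∧ pvGet2 b n.1 n.2 = p := by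
          intro n
          rw [hpushdef, List.mem_filter]
          simp [decide_eq_true_eq]
        have hpushR : ∀ n ∈ push, ReachG b p s n := by
          intro n hn
          obtain ⟨h1, h2, h3⟩ := (hpushmem n).mp hn
          exact ReachG.step hcR h1 h2 h3
        have hpushlen : push.length ≤ 4 := by
          calc push.length ≤ (pvNbrs c).length := List.length_filter_le _ _
            _ = 4 := length_pvNbrs c
        have hlib2 : (lib || (pvNbrs c).any (fun n => decide (inB b n ∧ pvGet2 b n.1 n.2 = "."))) = true
            ↔ ∃ g ∈ grp2, dotNbr b g := by
          rw [Bool.or_eq_true, hlib]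
          constructor
          · rintro (⟨g, h1, h2⟩ | hany)
            · exact ⟨g, List.mem_append.mpr (Or.inl h1), h2⟩
            · obtain ⟨n, hn, hdec⟩ := List.any_eq_true.mp hany
              rw [decide_eq_true_eq] at hdec
              exact ⟨c, List.mem_append.mpr (Or.inr (by simp)), n, hn, hdec.1, hdec.2⟩
          · rintro ⟨g, hg, hdot⟩
            rcases List.mem_append.mp hg with h | h
            · exact Or.inl ⟨g, h, hdot⟩
            · simp at h
              subst h
              obtain ⟨n, hn, h1, h2⟩ := hdot
              exact Or.inr (List.any_eq_true.mpr ⟨n, hn, by rw [decide_eq_true_eq]; exact ⟨h1, h2⟩⟩)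
        refine ih (push ++ st') grp2 _ hnd2 hG2 ?_ ?_ ?_ hlib2 ?_
        · intro t ht
          rcases List.mem_append.mp ht with h | h
          · exact hpushR t h
          · exact hst t (by simp [h])
        · intro g hg nb hnb h1 h2
          rcases List.mem_append.mp hg with hgG | hgc
          · rcases hcov g hgG nb hnb h1 h2 with h | h
            · exact Or.inl (List.mem_append.mpr (Or.inl h))
            · rcases List.mem_cons.mp h with he | hm
              · exact Or.inl (List.mem_append.mpr (Or.inr (by simp [he])))
              · exact Or.inr (List.mem_append.mpr (Or.inr hm))
          · simp at hgc
            subst hgc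
            by_cases hnb2 : nb ∈ grp2
            · exact Or.inl hnb2
            · exact Or.inr (List.mem_append.mpr (Or.inl ((hpushmem nb).mpr ⟨hnb, h1, h2⟩)))
        · rcases hanch with h | h
          · exact Or.inl (List.mem_append.mpr (Or.inl h))
          · rcases List.mem_cons.mp h with he | hm
            · exact Or.inl (List.mem_append.mpr (Or.inr (by simp [he])))
            · exact Or.inr (List.mem_append.mpr (Or.inr hm))
        · have : grp2.length = grp.length + 1 := by simp [hgrp2def]
          simp only [List.length_append, List.length_cons] at hfuel ⊢
          omega

theorem step_eq (x y : Int) (opp : String) (hop : opp = "O" ∨ opp = "X")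
    (st : List (List String) × Int) (d : Int × Int) :
    aStep x y opp st d = bStep opp st (x + d.1, y + d.2) := by
  have hp : opp ≠ "." := by rcases hop with h | h <;> simp [h]
  have hp0 : opp ≠ "" := by rcases hop with h | h <;> simp [h]
  unfold aStep bStep
  simp only
  by_cases hg : (0 ≤ x + d.1 ∧ x + d.1 < (st.1.length : Int) ∧ 0 ≤ y + d.2 ∧ y + d.2 < (st.1.length : Int)) ∧
      pvGet2 st.1 (x + d.1) (y + d.2) = opp
  · rw [if_pos hg, if_pos hg]
    have hs : inB st.1 (x + d.1, y + d.2) := hg.1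
    have hsp : pvGet2 st.1 (x + d.1, y + d.2).1 (x + d.1, y + d.2).2 = opp := hg.2
    obtain ⟨G, L, hfl, hGnd, hGmem, hLiff⟩ :=
      flood_spec st.1 opp hp (x + d.1, y + d.2) hs hsp
        (5 * st.1.length * st.1.length + 2) [(x + d.1, y + d.2)] [] false
        (by simp) (by simp)
        (fun t ht => by simp at ht; subst ht; exact ReachG.refl)
        (by simp) (Or.inr (by simp)) (by simp)
        (by simp only [List.length_cons, List.length_nil]; have h5 := Nat.mul_assoc 5 st.1.length st.1.length; omega)
    have hLiff2 : L = true ↔ LibR st.1 opp (x + d.1, y + d.2) := by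
      rw [hLiff, libr_iff hp hs hsp]
    have higc := igc_iff st.1 opp (x + d.1, y + d.2) hs
    by_cases hlib : LibR st.1 opp (x + d.1, y + d.2)
    · have h1 : isGroupCaptured st.1 (x + d.1) (y + d.2) opp = false := by
        rcases Bool.eq_false_or_eq_true (isGroupCaptured st.1 (x + d.1) (y + d.2) opp) with h | h
        · exact absurd hlib (higc.mp h)
        · exact h
      have h2 : L = true := hLiff2.mpr hlib
      rw [hfl, h1]
      simp [h2]
    · have h1 : isGroupCaptured st.1 (x + d.1) (y + d.2) opp = true := higc.mpr hlib
      have h2 : L = false := by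
        rcases Bool.eq_false_or_eq_true L with h | h
        · exact absurd (hLiff2.mp h) hlib
        · exact h
      obtain ⟨D', hrg, hDnd, hDmem⟩ :=
        rg_spec st.1 opp hp hp0 (x + d.1, y + d.2) hs hsp
          (5 * st.1.length * st.1.length + 2) [] [(x + d.1, y + d.2)]
          (by simp) (by simp)
          (fun t ht => by simp at ht; subst ht; exact ReachG.refl)
          (by simp) (Or.inr (by simp))
          (by simp only [List.length_cons, List.length_nil]; have h5 := Nat.mul_assoc 5 st.1.length st.1.length; omega)
      have hrg' : removeGroup st.1 (x + d.1) (y + d.2) opp = ((D'.length : Int), clearGroup st.1 D') := by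
        have : clearGroup st.1 [] = st.1 := rfl
        rw [removeGroup]
        rw [← this]
        have h0 : ((([] : List (Int × Int)).length : Int)) = (0 : Int) := by simp
        rw [← h0]
        exact hrg
      have hmemeq : ∀ a : Int × Int, a ∈ D' ↔ a ∈ G := by
        intro a; rw [hDmem a, hGmem a]
      have hperm : D'.length = G.length :=
        ((List.perm_ext_iff_of_nodup hDnd hGnd).mpr hmemeq).length_eq
      have HVD : ∀ e ∈ D', 0 ≤ e.1 ∧ 0 ≤ e.2 ∧ pvGet2 st.1 e.1 e.2 ≠ "" := by
        intro e he
        obtain ⟨h3, h4⟩ := reach_inB_cell ((hDmem e).mp he) hs hsp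
        exact ⟨h3.1, h3.2.2.1, by rw [h4]; exact hp0⟩
      have HVG : ∀ e ∈ G, 0 ≤ e.1 ∧ 0 ≤ e.2 ∧ pvGet2 st.1 e.1 e.2 ≠ "" := by
        intro e he
        obtain ⟨h3, h4⟩ := reach_inB_cell ((hGmem e).mp he) hs hsp
        exact ⟨h3.1, h3.2.2.1, by rw [h4]; exact hp0⟩
      have hboards : clearGroup st.1 D' = clearGroup st.1 G := by
        apply board_ext
        · rw [length_clearGroup, length_clearGroup]
        · intro k; rw [rowlen_clearGroup, rowlen_clearGroup]
        · intro k l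
          rw [pvGet2_clearGroup D' st.1 HVD (k : Int) (l : Int) (by positivity) (by positivity),
              pvGet2_clearGroup G st.1 HVG (k : Int) (l : Int) (by positivity) (by positivity)]
          by_cases hmem : ((k : Int), (l : Int)) ∈ D'
          · rw [if_pos hmem, if_pos ((hmemeq _).mp hmem)]
          · rw [if_neg hmem, if_neg (fun h => hmem ((hmemeq _).mpr h))]
      rw [if_pos h1, hrg', hfl]
      simp only [h2, Bool.false_eq_true, if_false]
      rw [hboards, hperm]
  · rw [if_neg hg, if_neg hg]

-- ===== VERDICT (by name: the statement is the Claim_ definition above) =====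
theorem capture_stones_spec : Claim_equal_capture_stones := by
  intro board x y current_player prisoners _ _
  unfold Spec_capture_stones capture_stones capture_stones_alt
  dsimp only
  have hlist : ([(x - 1, y), (x + 1, y), (x, y - 1), (x, y + 1)] : List (Int × Int))
      = pvDeltas.map (fun d => (x + d.1, y + d.2)) := by
    simp [pvDeltas, Prod.ext_iff]; omega
  rw [hlist, List.foldl_map]
  have hop : (if current_player = "X" then "O" else "X") = "O" ∨
      (if current_player = "X" then "O" else "X") = "X" := by
    by_cases h : current_player = "X" <;> simp [h]
  have hfold : ∀ (l : List (Int × Int)) (st : List (List String) × Int),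
      l.foldl (aStep x y (if current_player = "X" then "O" else "X")) st
        = l.foldl (fun st d => bStep (if current_player = "X" then "O" else "X") st (x + d.1, y + d.2)) st := by
    intro l
    induction l with
    | nil => intro st; rfl
    | cons d l ih => intro st; simp only [List.foldl_cons, ih, step_eq x y _ hop]
  rw [hfold]
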